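-- pv_equiv track=rewrite | github.com/caiohenrique6/Deep-Sea | utilidades_pbl.py | bau
-- ===== SOURCE A (Python) =====
-- def bau(metros):
--     tesouros = ["$"]*(metros+1) # definimos a lista de tesouros
--     um_terco = (metros + 1) // 3 # um calculo basico para vermos qual indice do mapa é menor que um terco um terco ou maior que
--     for i in range(len(tesouros)):
--         if i == 0:
--             tesouros[i] = "[Submarino]"
--         elif i < um_terco:
--             tesouros[i] = "$          "
--         elif i < 2 * um_terco:
--             tesouros[i] = "$$         "
--         else:
--             tesouros[i] = "$$$        "
--     return tesouros
-- ===== SOURCE B (Python) =====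
-- def bau(metros):
--     n = metros + 1
--     if n <= 0:
--         return []
--     um_terco = n // 3
--     tesouros = (["$          "] * um_terco
--                 + ["$$         "] * um_terco
--                 + ["$$$        "] * (n - 2 * um_terco))
--     tesouros[0] = "[Submarino]"
--     return tesouros
-- ===== Notes on version B (the rewrite author's own statement) =====
-- stated objective: simpler
-- what changed: Replaces the per-index branching loop with closed-form concatenation of three homogeneous replicated segments, then overwrites the first entry with the submarine marker.
import Mathlib
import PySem

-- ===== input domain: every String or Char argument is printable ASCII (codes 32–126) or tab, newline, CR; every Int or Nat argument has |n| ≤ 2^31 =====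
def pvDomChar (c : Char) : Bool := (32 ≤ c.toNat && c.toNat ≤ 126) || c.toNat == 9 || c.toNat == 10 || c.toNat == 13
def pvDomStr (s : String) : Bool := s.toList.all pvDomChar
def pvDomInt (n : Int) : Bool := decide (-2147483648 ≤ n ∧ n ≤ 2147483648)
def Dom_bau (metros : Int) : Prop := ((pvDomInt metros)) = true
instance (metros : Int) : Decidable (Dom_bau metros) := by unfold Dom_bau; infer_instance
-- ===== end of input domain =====

-- B replaces A's per-index branching loop by concatenating three replicated segments
-- and then overwriting the first entry (objective: simpler).

-- ===== PORT A =====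
-- A overwrites every index of ["$"]*(metros+1) inside its loop, so the loop is
-- transliterated as a map over the index range (the initial "$" entries never survive).
def bau (metros : Int) : List String :=
  let um_terco := PySem.Int.floordiv (metros + 1) 3
  (List.range (metros + 1).toNat).map (fun (i : Nat) =>
    if i = 0 then "[Submarino]"
    else if (i : Int) < um_terco then "$          "
    else if (i : Int) < 2 * um_terco then "$$         "
    else "$$$        ")

-- ===== PORT B =====
def bau_alt (metros : Int) : List String :=
  let n := metros + 1
  if n ≤ 0 then []
  else
    let um_terco := PySem.Int.floordiv n 3
    let tesouros := List.replicate um_terco.toNat "$          "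
      ++ List.replicate um_terco.toNat "$$         "
      ++ List.replicate (n - 2 * um_terco).toNat "$$$        "
    PySem.List.pySetD tesouros 0 "[Submarino]"

-- ===== PRECONDITION & SPEC =====
def Spec_bau (metros : Int) (out : List String) : Prop := out = bau_alt metros
instance (metros : Int) (out : List String) : Decidable (Spec_bau metros out) := by unfold Spec_bau; infer_instance

-- ===== CLAIM (what is proved, stated in full; the proofs are below) =====
def Claim_equal_bau : Prop := ∀ (metros : Int), Dom_bau metros → Spec_bau metros (bau metros)

-- ===== LEMMAS AND PROOFS =====
theorem bau_eq (metros : Int) : bau metros = bau_alt metros := by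
  unfold bau bau_alt
  by_cases h : metros + 1 ≤ 0
  · simp [h, Int.toNat_of_nonpos h]
  · rw [not_le] at h
    simp only [if_neg (by omega : ¬ metros + 1 ≤ 0)]
    set n := metros + 1 with hn
    set t := PySem.Int.floordiv n 3 with htdef
    have hbr : t * 3 ≤ n ∧ n < (t + 1) * 3 :=
      (PySem.Int.floordiv_eq_iff_of_pos (by norm_num : (0:Int) < 3)).mp rfl
    have ht0 : 0 ≤ t := by omega
    have hrest : 1 ≤ n - 2 * t := by omega
    rw [show ((0:Int)) = ((0:Nat):Int) from rfl, PySem.List.pySetD_natCast]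
    apply List.ext_getElem
    · simp [List.length_set, List.length_append, List.length_replicate,
        List.length_map, List.length_range]
      omega
    · intro i hi₁ hi₂
      simp only [List.length_map, List.length_range] at hi₁
      rw [List.getElem_map, List.getElem_range, List.getElem_set]
      simp only [List.getElem_append, List.length_replicate, List.length_append,
        List.getElem_replicate]
      split_ifs <;> first | rfl | (exfalso; omega)

-- ===== VERDICT (by name: the statement is the Claim_ definition above) =====
theorem bau_spec : Claim_equal_bau := by
  intro metros _
  unfold Spec_bau
  exact bau_eq metros
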